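-- pv_equiv track=rewrite | github.com/NeoMindStd/DrawGraph | DrawGraph.py | bfsGraph
-- ===== SOURCE A (Python) =====
-- from collections import deque
--
-- def bfsGraph(points):
--     n = len(points)
--     result = []
--     queue = deque([])
--     enQ = queue.append
--     deQ = queue.popleft
--     for point in points:
--         queue.append([point])
--         while queue:
--             graph = deQ()
--             if len(graph) < n:
--                 for point in points:
--                     if point not in graph:
--                         enQ(graph+[point])
--             else:
--                 new = list(reversed(graph))
--                 flag = True
--                 for i in range(len(result)):
--                     cnt = 0
--                     for j in range(n):
--                         if result[i][j] != new[j]: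
--                             break
--                         cnt += 1
--                     if cnt == n:
--                         flag = False
--                         break
--                 if flag:
--                     result.append(graph)
--
--     return result
-- ===== SOURCE B (Python) =====
-- def bfsGraph(points):
--     n = len(points)
--     result = []
--
--     def dfs(path):
--         if len(path) == n:
--             if list(reversed(path)) not in result:
--                 result.append(path)
--         else:
--             for point in points:
--                 if point not in path:
--                     dfs(path + [point])
--
--     for point in points:
--         dfs([point])
--     return result
-- ===== Notes on version B (the rewrite author's own statement) =====
-- stated objective: simpler
-- what changed: Replaced A's explicit deque-driven BFS worklist (with its hand-written index-by-index reverse-comparison dedup loops) by a direct recursive DFS over growing paths with a plain list-membership test for the reversed permutation.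
import Mathlib
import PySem

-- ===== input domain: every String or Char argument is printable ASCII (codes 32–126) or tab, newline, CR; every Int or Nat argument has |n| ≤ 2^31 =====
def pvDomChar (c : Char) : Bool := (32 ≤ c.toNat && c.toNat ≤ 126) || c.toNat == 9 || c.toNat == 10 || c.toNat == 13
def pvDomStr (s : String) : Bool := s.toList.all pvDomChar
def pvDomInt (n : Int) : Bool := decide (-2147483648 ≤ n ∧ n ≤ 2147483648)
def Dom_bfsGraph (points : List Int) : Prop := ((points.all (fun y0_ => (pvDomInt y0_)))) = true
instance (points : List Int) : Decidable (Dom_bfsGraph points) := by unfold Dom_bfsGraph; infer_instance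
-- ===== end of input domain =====

-- B replaces A's explicit deque-driven BFS worklist with a direct recursive DFS over partial
-- paths (objective: simpler — no queue bookkeeping, and the reverse-dedup is a plain membership test).

-- ===== PORT A =====
-- children enqueued by 'for point in points: if point not in graph: enQ(graph+[point])'
def pvChildren (points g : List Int) : List (List Int) :=
  (points.filter (fun p => ¬ p ∈ g)).map (fun p => g ++ [p])

-- inner 'for j in range(n)' counting loop with break (js = remaining indices, cnt = count so far).
-- On admitted inputs both lists have length n, so pyGet? never returns none; the none branch
-- (where Python would raise IndexError) is unreachable and ports as a break.
def pvCntGo (r new : List Int) (js : List Int) (cnt : Nat) : Nat :=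
  match js with
  | [] => cnt
  | j :: rest =>
    match PySem.List.pyGet? r j, PySem.List.pyGet? new j with
    | some x, some y => if x ≠ y then cnt else pvCntGo r new rest (cnt + 1)
    | _, _ => cnt

-- 'for i in range(len(result))' flag loop with break, traversed as the list itself
def pvFlagGo (result : List (List Int)) (new : List Int) (n : Nat) : Bool :=
  match result with
  | [] => true
  | r :: rest =>
    if pvCntGo r new (PySem.List.pyRange 0 (n : Int) 1) 0 = n then false
    else pvFlagGo rest new n

-- the 'else' branch of A's BFS loop: reverse, scan result, append if no match
def pvEmit (n : Nat) (result : List (List Int)) (graph : List Int) : List (List Int) :=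
  let new := graph.reverse
  if pvFlagGo result new n then result ++ [graph] else result

-- termination measure for the BFS queue
def pvW (n : Nat) (g : List Int) : Nat := (2 * n + 2) ^ (n - g.length)
def pvMeasureQ (n : Nat) (q : List (List Int)) : Nat := (q.map (pvW n)).sum

theorem pvChildren_len (points g : List Int) :
    ∀ c ∈ pvChildren points g, c.length = g.length + 1 := by
  intro c hc
  simp only [pvChildren, List.mem_map, List.mem_filter] at hc
  obtain ⟨p, _, rfl⟩ := hc
  simp

theorem pvChildren_count (points g : List Int) :
    (pvChildren points g).length ≤ points.length := by
  simp only [pvChildren, List.length_map]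
  exact List.length_filter_le _ _

theorem pvMeasure_children_le (points g : List Int) (h : g.length < points.length) :
    pvMeasureQ points.length (pvChildren points g) + (points.length + 2)
      ≤ pvW points.length g := by
  set n := points.length with hn
  have hsum : pvMeasureQ n (pvChildren points g)
      = (pvChildren points g).length * (2 * n + 2) ^ (n - (g.length + 1)) := by
    unfold pvMeasureQ
    rw [List.sum_eq_card_nsmul (m := (2 * n + 2) ^ (n - (g.length + 1)))]
    · simp [mul_comm]
    · intro x hx
      simp only [List.mem_map] at hx
      obtain ⟨c, hc, rfl⟩ := hx
      simp [pvW, pvChildren_len points g c hc]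
  rw [hsum]
  have hpow : (2 * n + 2) ^ (n - g.length) = (2 * n + 2) * (2 * n + 2) ^ (n - (g.length + 1)) := by
    have : n - g.length = (n - (g.length + 1)) + 1 := by omega
    rw [this, pow_succ]; ring
  unfold pvW
  rw [hpow]
  have hp : 1 ≤ (2 * n + 2) ^ (n - (g.length + 1)) := Nat.one_le_iff_ne_zero.mpr (by positivity)
  have hcnt := pvChildren_count points g
  calc (pvChildren points g).length * (2 * n + 2) ^ (n - (g.length + 1)) + (n + 2)
      ≤ n * (2 * n + 2) ^ (n - (g.length + 1)) + (n + 2) * (2 * n + 2) ^ (n - (g.length + 1)) := by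
        have h1 : (pvChildren points g).length * (2 * n + 2) ^ (n - (g.length + 1))
            ≤ n * (2 * n + 2) ^ (n - (g.length + 1)) := Nat.mul_le_mul_right _ (hn ▸ hcnt)
        have h2 : (n + 2) ≤ (n + 2) * (2 * n + 2) ^ (n - (g.length + 1)) :=
          Nat.le_mul_of_pos_right _ (by omega)
        omega
    _ = (2 * n + 2) * (2 * n + 2) ^ (n - (g.length + 1)) := by ring

theorem pvMeasure_children_lt (points g : List Int) (h : g.length < points.length) :
    pvMeasureQ points.length (pvChildren points g) < pvW points.length g := by
  have := pvMeasure_children_le points g h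
  omega

-- the 'while queue' loop of A, one dequeue per step
def pvProcessQ (points : List Int) (q : List (List Int)) (result : List (List Int)) :
    List (List Int) :=
  match q with
  | [] => result
  | g :: rest =>
    if g.length < points.length then
      pvProcessQ points (rest ++ pvChildren points g) result
    else
      pvProcessQ points rest (pvEmit points.length result g)
termination_by pvMeasureQ points.length q
decreasing_by
  · rename_i h
    have := pvMeasure_children_lt points g h
    simp only [pvMeasureQ, List.map_cons, List.sum_cons, List.map_append, List.sum_append]
    change pvMeasureQ _ _ + pvMeasureQ _ _ < pvW _ g + pvMeasureQ _ _ at *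
    omega
  · have : 0 < pvW points.length g := Nat.pow_pos (by omega)
    simp only [pvMeasureQ, List.map_cons, List.sum_cons]
    omega

def bfsGraph (points : List Int) : List (List Int) :=
  points.foldl (fun result point => pvProcessQ points [[point]] result) []

-- ===== PORT B =====
-- recursive dfs(path) of Source B; fuel is only a totality guard (depth is bounded by n - len path,
-- and the top-level call passes fuel = n, which is always enough)
def pvDfs (points : List Int) (n : Nat) (fuel : Nat) (path : List Int)
    (result : List (List Int)) : List (List Int) :=
  if path.length = n then
    (if path.reverse ∈ result then result else result ++ [path])
  else
    match fuel with
    | 0 => result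
    | fuel' + 1 =>
      points.foldl
        (fun res p => if p ∈ path then res else pvDfs points n fuel' (path ++ [p]) res) result

def bfsGraph_alt (points : List Int) : List (List Int) :=
  points.foldl (fun result point => pvDfs points points.length points.length [point] result) []

-- ===== PRECONDITION & SPEC =====
def Spec_bfsGraph (points : List Int) (out : List (List Int)) : Prop := out = bfsGraph_alt points
instance (points : List Int) (out : List (List Int)) : Decidable (Spec_bfsGraph points out) := by unfold Spec_bfsGraph; infer_instance

-- ===== CLAIM (what is proved, stated in full; the proofs are below) =====
def Claim_equal_bfsGraph : Prop := ∀ (points : List Int), Dom_bfsGraph points → Spec_bfsGraph points (bfsGraph points)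

-- ===== LEMMAS AND PROOFS =====

theorem pvCntGo_gen (r new : List Int) (n : Nat) (hr : r.length = n) (hnew : new.length = n) :
    ∀ d k, n = k + d →
      (pvCntGo r new (PySem.List.pyRange (k : Int) (n : Int) 1) k = n ↔
        ∀ j : Nat, k ≤ j → r[j]? = new[j]?) := by
  intro d
  induction d with
  | zero =>
    intro k hk
    rw [PySem.List.pyRange_one_eq_nil (by exact_mod_cast (show n ≤ k by omega))]
    simp only [pvCntGo]
    constructor
    · intro _ j hj
      rw [List.getElem?_eq_none (by omega), List.getElem?_eq_none (by omega)]
    · intro _; omega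
  | succ d ih =>
    intro k hk
    have hkn : k < n := by omega
    rw [PySem.List.pyRange_one_cons (by exact_mod_cast hkn)]
    have h1 : PySem.List.pyGet? r ((k : Nat) : Int) = r[k]? := PySem.List.pyGet?_natCast r k
    have h2 : PySem.List.pyGet? new ((k : Nat) : Int) = new[k]? := PySem.List.pyGet?_natCast new k
    have hrk : r[k]? = some (r[k]'(by omega)) := List.getElem?_eq_getElem (by omega)
    have hnk : new[k]? = some (new[k]'(by omega)) := List.getElem?_eq_getElem (by omega)
    simp only [pvCntGo, h1, h2, hrk, hnk]
    by_cases hxy : r[k]'(by omega) = new[k]'(by omega)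
    · have hcast : (k : Int) + 1 = ((k + 1 : Nat) : Int) := by push_cast; ring
      rw [hcast]
      have := ih (k + 1) (by omega)
      simp only [hxy, ne_eq, not_true_eq_false, if_false]
      rw [this]
      constructor
      · intro h j hj
        rcases Nat.eq_or_lt_of_le hj with rfl | hlt
        · rw [hrk, hnk, hxy]
        · exact h j hlt
      · intro h j hj
        exact h j (by omega)
    · rw [if_pos (by simpa using hxy)]
      constructor
      · intro h; omega
      · intro h
        exfalso
        have := h k (le_refl _)
        rw [hrk, hnk] at this
        exact hxy (Option.some.inj this)

theorem pvCnt_eq_iff (r new : List Int) (n : Nat) (hr : r.length = n) (hnew : new.length = n) :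
    (pvCntGo r new (PySem.List.pyRange 0 (n : Int) 1) 0 = n ↔ r = new) := by
  have h0 : ((0 : Nat) : Int) = (0 : Int) := rfl
  rw [← h0, pvCntGo_gen r new n hr hnew n 0 (by omega)]
  constructor
  · intro h
    apply List.ext_getElem?
    intro j
    exact h j (Nat.zero_le _)
  · intro h j _
    rw [h]

theorem pvFlag_eq (result : List (List Int)) (new : List Int) (n : Nat)
    (hres : ∀ r ∈ result, r.length = n) (hnew : new.length = n) :
    pvFlagGo result new n = !(decide (new ∈ result)) := by
  induction result with
  | nil => simp [pvFlagGo]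
  | cons r rest ih =>
    have hr : r.length = n := hres r (by simp)
    simp only [pvFlagGo]
    by_cases hc : r = new
    · rw [if_pos ((pvCnt_eq_iff r new n hr hnew).mpr hc), hc]
      simp
    · rw [if_neg (fun h => hc ((pvCnt_eq_iff r new n hr hnew).mp h))]
      rw [ih (fun x hx => hres x (by simp [hx]))]
      simp [List.mem_cons, Ne.symm hc]

theorem pvEmit_eq (n : Nat) (result : List (List Int)) (g : List Int)
    (hres : ∀ r ∈ result, r.length = n) (hg : g.length = n) :
    pvEmit n result g = (if g.reverse ∈ result then result else result ++ [g]) := by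
  unfold pvEmit
  simp only []
  show (if pvFlagGo result g.reverse n = true then result ++ [g] else result) = _
  rw [pvFlag_eq result g.reverse n hres (by simpa using hg)]
  by_cases h : g.reverse ∈ result <;> simp [h]

theorem pvFoldlInv {α β : Type} (P : β → Prop) (f : β → α → β) :
    ∀ (l : List α) (b : β), P b → (∀ b a, P b → P (f b a)) → P (List.foldl f b l) := by
  intro l
  induction l with
  | nil => intro b hb _; exact hb
  | cons a l ih => intro b hb hf; exact ih (f b a) (hf b a hb) hf

theorem pvDfs_gate (points : List Int) (n fuel : Nat) (path : List Int)
    (result : List (List Int)) (hn : path.length = n) :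
    pvDfs points n fuel path result =
      (if path.reverse ∈ result then result else result ++ [path]) := by
  cases fuel <;> simp [pvDfs, hn]

theorem pvDfs_fuel (points : List Int) (n : Nat) :
    ∀ fuel fuel' path result, path.length ≤ n → n ≤ path.length + fuel →
      n ≤ path.length + fuel' →
      pvDfs points n fuel path result = pvDfs points n fuel' path result := by
  intro fuel
  induction fuel with
  | zero =>
    intro fuel' path result h1 h2 h3
    have hn : path.length = n := by omega
    rw [pvDfs_gate _ _ _ _ _ hn, pvDfs_gate _ _ _ _ _ hn]
  | succ f ih =>
    intro fuel' path result h1 h2 h3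
    by_cases hn : path.length = n
    · rw [pvDfs_gate _ _ _ _ _ hn, pvDfs_gate _ _ _ _ _ hn]
    · have hlt : path.length < n := by omega
      obtain ⟨f', rfl⟩ : ∃ f'', fuel' = f'' + 1 := ⟨fuel' - 1, by omega⟩
      simp only [pvDfs, if_neg hn]
      apply List.foldl_ext
      intro res p _
      by_cases hp : p ∈ path
      · simp [hp]
      · simp only [if_neg hp]
        exact ih f' (path ++ [p]) res (by simp; omega) (by simp; omega) (by simp; omega)

theorem pvDfs_len (points : List Int) (n : Nat) :
    ∀ fuel path result, (∀ r ∈ result, r.length = n) →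
      ∀ r ∈ pvDfs points n fuel path result, r.length = n := by
  intro fuel
  induction fuel with
  | zero =>
    intro path result hres r hr
    by_cases hn : path.length = n
    · simp only [pvDfs, if_pos hn] at hr
      by_cases hm : path.reverse ∈ result
      · exact hres r (by simpa [hm] using hr)
      · simp only [if_neg hm, List.mem_append, List.mem_singleton] at hr
        rcases hr with hr | rfl
        · exact hres r hr
        · exact hn
    · simp only [pvDfs, if_neg hn] at hr
      exact hres r hr
  | succ f ih =>
    intro path result hres r hr
    by_cases hn : path.length = n
    · simp only [pvDfs, if_pos hn] at hr
      by_cases hm : path.reverse ∈ result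
      · exact hres r (by simpa [hm] using hr)
      · simp only [if_neg hm, List.mem_append, List.mem_singleton] at hr
        rcases hr with hr | rfl
        · exact hres r hr
        · exact hn
    · simp only [pvDfs, if_neg hn] at hr
      refine pvFoldlInv (fun res => ∀ r ∈ res, r.length = n) _ points result hres ?_ r hr
      intro res p hresp
      by_cases hp : p ∈ path
      · simpa [hp] using hresp
      · simp only [if_neg hp]
        exact ih (path ++ [p]) res hresp

theorem pvFoldlFilter {α β : Type} (c : α → Prop) [DecidablePred c] (f : β → α → β) :
    ∀ (l : List α) (b : β),
      List.foldl (fun b a => if c a then b else f b a) b l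
        = List.foldl f b (l.filter (fun a => decide ¬ c a)) := by
  intro l
  induction l with
  | nil => intro b; rfl
  | cons a l ih => intro b; by_cases h : c a <;> simp [h, ih]

theorem pvDfs_succ (points : List Int) (n f : Nat) (path : List Int) (res : List (List Int))
    (hn : ¬ path.length = n) :
    pvDfs points n (f + 1) path res =
      points.foldl (fun r p => if p ∈ path then r else pvDfs points n f (path ++ [p]) r) res := by
  rw [pvDfs, if_neg hn]

theorem pvDfs_step (points g : List Int) (res : List (List Int))
    (hlt : g.length < points.length) :
    pvDfs points points.length points.length g res =
      (pvChildren points g).foldl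
        (fun r c => pvDfs points points.length points.length c r) res := by
  obtain ⟨f, hf⟩ : ∃ f, points.length = f + 1 := ⟨points.length - 1, by omega⟩
  have h1 : pvDfs points points.length points.length g res
      = pvDfs points points.length (f + 1) g res := by
    exact pvDfs_fuel points points.length _ _ g res (by omega) (by omega) (by omega)
  rw [h1, pvDfs_succ points points.length f g res (by omega)]
  rw [pvFoldlFilter (fun p => p ∈ g) (fun r p => pvDfs points points.length f (g ++ [p]) r)]
  unfold pvChildren
  rw [List.foldl_map]
  apply List.foldl_ext
  intro b p hp
  exact pvDfs_fuel points points.length _ _ (g ++ [p]) b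
    (by simp only [List.length_append, List.length_cons, List.length_nil]; omega)
    (by simp only [List.length_append, List.length_cons, List.length_nil]; omega)
    (by simp only [List.length_append, List.length_cons, List.length_nil]; omega)

theorem pvMeasureQ_append (n : Nat) (q1 q2 : List (List Int)) :
    pvMeasureQ n (q1 ++ q2) = pvMeasureQ n q1 + pvMeasureQ n q2 := by
  simp [pvMeasureQ]

theorem pvMeasureQ_cons (n : Nat) (g : List Int) (q : List (List Int)) :
    pvMeasureQ n (g :: q) = pvW n g + pvMeasureQ n q := by
  simp [pvMeasureQ]

theorem pvW_pos (n : Nat) (g : List Int) : 1 ≤ pvW n g :=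
  Nat.one_le_iff_ne_zero.mpr (pow_ne_zero _ (by omega))

-- main invariant: BFS on a queue of one full level A (length L) followed by the already
-- generated next level B (length L+1) produces the dedup of the DFS results of B then A.
theorem pvMain (points : List Int) :
    ∀ m A B result L, pvMeasureQ points.length (A ++ B) * 2 + B.length ≤ m →
      (∀ a ∈ A, a.length = L) → (∀ b ∈ B, b.length = L + 1) → L ≤ points.length →
      (L < points.length ∨ B = []) → (∀ r ∈ result, r.length = points.length) →
      pvProcessQ points (A ++ B) result =
        A.foldl (fun res g => pvDfs points points.length points.length g res)
          (B.foldl (fun res g => pvDfs points points.length points.length g res) result) := by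
  intro m
  induction m using Nat.strong_induction_on with
  | _ m ih =>
    intro A B result L hb hA hB hLn hLB hres
    cases A with
    | nil =>
      cases B with
      | nil => simp [pvProcessQ]
      | cons b B' =>
        have hlt : L < points.length := by
          rcases hLB with h | h
          · exact h
          · simp at h
        have hm0 : 1 ≤ m := by
          have := hb; simp only [List.nil_append, List.length_cons] at this; omega
        have hb' : pvMeasureQ points.length ((b :: B') ++ ([] : List (List Int))) * 2
            + ([] : List (List Int)).length ≤ m - 1 := by
          simp only [List.append_nil, List.length_nil, Nat.add_zero]
          simp only [List.nil_append, List.length_cons] at hb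
          omega
        have hrec := ih (m - 1) (by omega) (b :: B') [] result (L + 1) hb' hB
          (by intro x hx; simp at hx) (by omega) (Or.inr rfl) hres
        simp only [List.append_nil, List.foldl_nil] at hrec
        simp only [List.nil_append, List.foldl_nil]
        exact hrec
    | cons g A' =>
      have hgL : g.length = L := hA g (by simp)
      by_cases hlt : L < points.length
      · rw [show (g :: A') ++ B = g :: (A' ++ B) by simp]
        rw [pvProcessQ, if_pos (by omega)]
        rw [List.append_assoc]
        have hle := pvMeasure_children_le points g (by omega)
        have hCgc := pvChildren_count points g
        have e1 : pvMeasureQ points.length (g :: (A' ++ B))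
            = pvW points.length g + pvMeasureQ points.length A' + pvMeasureQ points.length B := by
          rw [pvMeasureQ_cons, pvMeasureQ_append]; ring
        have e2 : pvMeasureQ points.length (A' ++ (B ++ pvChildren points g))
            = pvMeasureQ points.length A' + pvMeasureQ points.length B
              + pvMeasureQ points.length (pvChildren points g) := by
          rw [pvMeasureQ_append, pvMeasureQ_append]; ring
        have hb0 : pvMeasureQ points.length (g :: (A' ++ B)) * 2 + B.length ≤ m := by
          rw [show g :: (A' ++ B) = (g :: A') ++ B by simp] at e1 ⊢
          exact hb
        have hm1 : pvMeasureQ points.length (A' ++ (B ++ pvChildren points g)) * 2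
            + (B ++ pvChildren points g).length ≤ m - 1 := by
          rw [e2]
          rw [e1] at hb0
          simp only [List.length_append]
          omega
        have hrec := ih (m - 1) (by have := pvW_pos points.length g; rw [e1] at hb0; omega)
          A' (B ++ pvChildren points g) result L hm1 (fun a ha => hA a (by simp [ha]))
          (by
            intro c hc
            rcases List.mem_append.mp hc with h | h
            · exact hB c h
            · rw [pvChildren_len points g c h, hgL])
          hLn (Or.inl hlt) hres
        rw [hrec, List.foldl_append, List.foldl_cons]
        congr 1
        exact (pvDfs_step points g _ (by omega)).symm
      · have hLeq : L = points.length := by omega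
        have hBnil : B = [] := by
          rcases hLB with h | h
          · exact absurd h hlt
          · exact h
        subst hBnil
        simp only [List.append_nil] at hb ⊢
        rw [pvProcessQ, if_neg (by omega)]
        have hres' : ∀ r ∈ pvEmit points.length result g, r.length = points.length := by
          rw [pvEmit_eq _ _ _ hres (by omega)]
          split_ifs with hm
          · exact hres
          · intro r hr
            rcases List.mem_append.mp hr with h | h
            · exact hres r h
            · simp only [List.mem_singleton] at h; subst h; omega
        have hwg : pvW points.length g = 1 := by
          simp [pvW, show points.length - g.length = 0 by omega]
        have hb1 : pvW points.length g + pvMeasureQ points.length A' ≤ pvMeasureQ points.length (g :: A') := by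
          rw [pvMeasureQ_cons]
        have hm1 : pvMeasureQ points.length (A' ++ ([] : List (List Int))) * 2
            + ([] : List (List Int)).length ≤ m - 2 := by
          simp only [List.append_nil, List.length_nil, Nat.add_zero]
          rw [pvMeasureQ_cons] at hb
          simp only [List.length_nil, Nat.add_zero] at hb
          omega
        have hrec := ih (m - 2) (by rw [pvMeasureQ_cons] at hb; have := pvW_pos points.length g; simp at hb; omega)
          A' [] (pvEmit points.length result g) L hm1 (fun a ha => hA a (by simp [ha]))
          (by intro x hx; simp at hx)
          hLn (Or.inr rfl) hres'
        simp only [List.append_nil, List.foldl_nil] at hrec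
        rw [hrec, List.foldl_nil, List.foldl_cons]
        congr 1
        rw [pvDfs_gate points points.length points.length g result (by omega)]
        rw [pvEmit_eq _ _ _ hres (by omega)]

theorem pvTop (points : List Int) (hpos : 1 ≤ points.length) :
    ∀ (l : List Int) (res : List (List Int)), (∀ r ∈ res, r.length = points.length) →
      List.foldl (fun result point => pvProcessQ points [[point]] result) res l
        = List.foldl
            (fun result point => pvDfs points points.length points.length [point] result) res l := by
  intro l
  induction l with
  | nil => intro res _; rfl
  | cons p l ih =>
    intro res hres
    simp only [List.foldl_cons]
    have hstep : pvProcessQ points [[p]] res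
        = pvDfs points points.length points.length [p] res := by
      have hmain := pvMain points
        (pvMeasureQ points.length ([[p]] ++ ([] : List (List Int))) * 2
          + ([] : List (List Int)).length)
        [[p]] [] res 1 (le_refl _)
        (by intro a ha; simp only [List.mem_singleton] at ha; subst ha; rfl)
        (by intro b hb; simp at hb) hpos (Or.inr rfl) hres
      simp only [List.append_nil, List.foldl_nil, List.foldl_cons] at hmain
      exact hmain
    rw [hstep, ih]
    intro r hr
    exact pvDfs_len points points.length _ _ _ hres r hr

-- ===== VERDICT (by name: the statement is the Claim_ definition above) =====
theorem bfsGraph_spec : Claim_equal_bfsGraph := by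
  intro points _
  unfold Spec_bfsGraph bfsGraph bfsGraph_alt
  cases points with
  | nil => rfl
  | cons p ps =>
    exact pvTop (p :: ps) (by simp) (p :: ps) [] (by intro r hr; simp at hr)
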